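-- pv_equiv track=rewrite | github.com/jieLin-world/StereoMatching | 4_qsm/utils/visualizations/qubo_matrix_visualizer.py | _make_dict_key_tuples_into_ordered_list
-- ===== SOURCE A (Python) =====
-- def _make_dict_key_tuples_into_ordered_list(dictionary):
--     s = set()
--     for key in dictionary.keys():
--         e_0 = key[0]
--         e_1 = key[1]
--         s.add(e_0)
--         s.add(e_1)
--     sorted_list = sorted(s)
--     return sorted_list
-- ===== SOURCE B (Python) =====
-- def _make_dict_key_tuples_into_ordered_list(dictionary):
--     flat = []
--     for key in dictionary.keys():
--         flat.append(key[0])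
--         flat.append(key[1])
--     flat.sort()
--     result = []
--     for x in flat:
--         if not result or x != result[-1]:
--             result.append(x)
--     return result
-- ===== Notes on version B (the rewrite author's own statement) =====
-- stated objective: alternative
-- what changed: Replaces the hash-set accumulation with a flat list of all key components, one sort of that 2n-long list, and a single adjacent-deduplication pass; no set is maintained and uniqueness comes from adjacency in sorted order.
import Mathlib
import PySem

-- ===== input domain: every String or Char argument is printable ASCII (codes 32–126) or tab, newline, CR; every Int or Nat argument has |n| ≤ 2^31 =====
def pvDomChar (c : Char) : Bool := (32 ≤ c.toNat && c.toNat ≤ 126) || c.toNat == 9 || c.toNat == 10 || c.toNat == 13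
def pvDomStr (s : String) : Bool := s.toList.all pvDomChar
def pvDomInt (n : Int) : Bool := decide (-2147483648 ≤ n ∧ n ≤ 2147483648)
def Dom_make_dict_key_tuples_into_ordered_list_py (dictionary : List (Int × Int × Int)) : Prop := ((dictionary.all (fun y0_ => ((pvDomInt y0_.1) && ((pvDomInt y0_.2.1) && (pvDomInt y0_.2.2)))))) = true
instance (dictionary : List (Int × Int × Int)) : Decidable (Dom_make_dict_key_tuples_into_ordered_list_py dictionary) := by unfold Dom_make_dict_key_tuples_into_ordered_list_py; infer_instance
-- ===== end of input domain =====

-- B collects all key components in a flat list, sorts it once, and deduplicates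
-- adjacent equals in one pass — no set is maintained (objective: alternative).

-- ===== PORT A =====
-- for key in dictionary.keys(): s.add(key[0]); s.add(key[1]);  return sorted(s)
def make_dict_key_tuples_into_ordered_list_py (dictionary : List (Int × Int × Int)) : List Int :=
  let s : PySem.Set Int :=
    dictionary.foldl (fun s kv => PySem.Set.add (PySem.Set.add s kv.1) kv.2.1) PySem.Set.empty
  PySem.List.sorted s (fun x => x) false

-- ===== PORT B =====
-- flat = all key[0],key[1]; flat.sort(); then append x only when result empty or x ≠ result[-1]
def make_dict_key_tuples_into_ordered_list_py_alt (dictionary : List (Int × Int × Int)) : List Int :=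
  let flat : List Int := dictionary.foldl (fun acc kv => acc ++ [kv.1, kv.2.1]) []
  let srt := PySem.List.sorted flat (fun x => x) false
  srt.foldl (fun res x => if res.getLast? == some x then res else res ++ [x]) []

-- ===== PRECONDITION & SPEC =====
def Spec_make_dict_key_tuples_into_ordered_list_py (dictionary : List (Int × Int × Int)) (out : List Int) : Prop := out = make_dict_key_tuples_into_ordered_list_py_alt dictionary
instance (dictionary : List (Int × Int × Int)) (out : List Int) : Decidable (Spec_make_dict_key_tuples_into_ordered_list_py dictionary out) := by unfold Spec_make_dict_key_tuples_into_ordered_list_py; infer_instance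

-- ===== CLAIM (what is proved, stated in full; the proofs are below) =====
def Claim_equal_make_dict_key_tuples_into_ordered_list_py : Prop := ∀ (dictionary : List (Int × Int × Int)), Dom_make_dict_key_tuples_into_ordered_list_py dictionary → Spec_make_dict_key_tuples_into_ordered_list_py dictionary (make_dict_key_tuples_into_ordered_list_py dictionary)

-- ===== LEMMAS AND PROOFS =====

-- in a ≤-sorted list every element is bounded by the last one
theorem le_getLast_of_sorted : ∀ {res : List Int} {m : Int}, res.Pairwise (fun a b => a ≤ b) → res.getLast? = some m → ∀ a ∈ res, a ≤ m := by
  intro res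
  induction res with
  | nil => intro m _ h; simp at h
  | cons x t ih =>
    intro m hp hl a ha
    cases t with
    | nil =>
      simp at hl ha; omega
    | cons y u =>
      rw [List.getLast?_cons_cons] at hl
      rcases List.mem_cons.mp ha with rfl | hat
      · have hm : m ∈ y :: u := List.mem_of_getLast? hl
        exact (List.pairwise_cons.mp hp).1 m hm
      · exact ih (List.pairwise_cons.mp hp).2 hl a hat

-- invariant for B's adjacent-dedup fold over a ≤-sorted list
theorem dedup_fold_invariant : ∀ (L res : List Int),
    L.Pairwise (fun a b => a ≤ b) → res.Pairwise (fun a b => a < b) →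
    (∀ a ∈ res, ∀ b ∈ L, a ≤ b) →
    (L.foldl (fun res x => if res.getLast? == some x then res else res ++ [x]) res).Pairwise (fun a b => a < b) ∧
    (∀ y, y ∈ L.foldl (fun res x => if res.getLast? == some x then res else res ++ [x]) res ↔ y ∈ res ∨ y ∈ L) := by
  intro L
  induction L with
  | nil => intro res _ hres _; simpa using hres
  | cons x t ih =>
    intro res hL hres hle
    have hLt : t.Pairwise (fun a b => a ≤ b) := (List.pairwise_cons.mp hL).2
    have hxt : ∀ b ∈ t, x ≤ b := (List.pairwise_cons.mp hL).1
    by_cases hskip : res.getLast? = some x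
    · have hxmem : x ∈ res := List.mem_of_getLast? hskip
      have step : (x :: t).foldl (fun res x => if res.getLast? == some x then res else res ++ [x]) res
          = t.foldl (fun res x => if res.getLast? == some x then res else res ++ [x]) res := by
        simp [List.foldl_cons, hskip]
      rw [step]
      have hle' : ∀ a ∈ res, ∀ b ∈ t, a ≤ b := fun a ha b hb => hle a ha b (List.mem_cons_of_mem _ hb)
      obtain ⟨h1, h2⟩ := ih res hLt hres hle'
      refine ⟨h1, fun y => ?_⟩
      rw [h2]
      constructor
      · rintro (h | h)
        · exact Or.inl h
        · exact Or.inr (List.mem_cons_of_mem _ h)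
      · rintro (h | h)
        · exact Or.inl h
        · rcases List.mem_cons.mp h with rfl | h
          · exact Or.inl hxmem
          · exact Or.inr h
    · have step : (x :: t).foldl (fun res x => if res.getLast? == some x then res else res ++ [x]) res
          = t.foldl (fun res x => if res.getLast? == some x then res else res ++ [x]) (res ++ [x]) := by
        simp [List.foldl_cons, hskip]
      rw [step]
      -- every element of res is strictly below x
      have halllt : ∀ a ∈ res, a < x := by
        intro a ha
        have hax : a ≤ x := hle a ha x (List.mem_cons_self)
        rcases lt_or_eq_of_le hax with h | rfl
        · exact h
        -- a = x ∈ res; the last element m satisfies a ≤ m ≤ x, so m = x, contradicting hskip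
        obtain ⟨m, hm⟩ := List.getLast?_isSome.mpr (List.ne_nil_of_mem ha) |> Option.isSome_iff_exists.mp
        have h1 : a ≤ m := le_getLast_of_sorted (hres.imp le_of_lt) hm a ha
        have h2 : m ≤ a := hle m (List.mem_of_getLast? hm) a (List.mem_cons_self)
        have : m = a := le_antisymm h2 h1
        exact absurd (this ▸ hm) hskip
      have hres' : (res ++ [x]).Pairwise (fun a b => a < b) := by
        refine List.pairwise_append.mpr ⟨hres, List.pairwise_singleton _ _, ?_⟩
        intro a ha b hb
        rw [List.mem_singleton] at hb
        subst hb
        exact halllt a ha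
      have hle' : ∀ a ∈ res ++ [x], ∀ b ∈ t, a ≤ b := by
        intro a ha b hb
        rcases List.mem_append.mp ha with h | h
        · exact hle a h b (List.mem_cons_of_mem _ hb)
        · rcases List.mem_singleton.mp h with rfl; exact hxt b hb
      obtain ⟨h1, h2⟩ := ih (res ++ [x]) hLt hres' hle'
      refine ⟨h1, fun y => ?_⟩
      rw [h2]
      simp [List.mem_append, or_assoc, List.mem_cons]

-- A's set-accumulating loop is Set.update with the flattened key components
theorem setfold_eq_update : ∀ (d : List (Int × Int × Int)) (s : PySem.Set Int),
    d.foldl (fun s kv => PySem.Set.add (PySem.Set.add s kv.1) kv.2.1) s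
      = PySem.Set.update s (d.flatMap fun kv => [kv.1, kv.2.1]) := by
  intro d
  induction d with
  | nil => intro s; simp [PySem.Set.update]
  | cons kv t ih =>
    intro s
    simp only [List.foldl_cons, List.flatMap_cons, ih]
    rw [List.cons_append, List.cons_append, List.nil_append,
        PySem.Set.update_cons, PySem.Set.update_cons]

-- the central fact: sort-then-adjacent-dedup of any list equals sorted(set(that list))
theorem dedup_sorted_eq_sorted_ofList (xs : List Int) :
    (PySem.List.sorted xs (fun x => x) false).foldl
        (fun res x => if res.getLast? == some x then res else res ++ [x]) []
      = PySem.List.sorted (PySem.Set.ofList xs) (fun x => x) false := by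
  set L := PySem.List.sorted xs (fun x => x) false with hLdef
  have hLsorted : L.Pairwise (fun a b => a ≤ b) := by
    have := PySem.List.sorted_pairwise xs (fun x => x)
    simpa [hLdef] using this
  obtain ⟨h1, h2⟩ := dedup_fold_invariant L [] hLsorted (List.Pairwise.nil) (by simp)
  set out := L.foldl (fun res x => if res.getLast? == some x then res else res ++ [x]) [] with houtdef
  have hnodup : out.Nodup := h1.imp (fun h => ne_of_lt h)
  have hmemL : ∀ y, y ∈ L ↔ y ∈ xs := by
    intro y
    exact (PySem.List.sorted_perm xs (fun x => x) false).mem_iff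
  have hperm : out.Perm (PySem.Set.ofList xs) := by
    rw [List.perm_ext_iff_of_nodup hnodup (PySem.Set.nodup_ofList xs)]
    intro y
    rw [h2 y, PySem.Set.mem_ofList, ← hmemL y]
    simp
  exact (PySem.List.sorted_eq_of_perm_of_pairwise_lt _ _ _ hperm h1).symm

-- ===== VERDICT (by name: the statement is the Claim_ definition above) =====
theorem make_dict_key_tuples_into_ordered_list_py_spec : Claim_equal_make_dict_key_tuples_into_ordered_list_py := by
  intro dictionary _
  unfold Spec_make_dict_key_tuples_into_ordered_list_py
  unfold make_dict_key_tuples_into_ordered_list_py make_dict_key_tuples_into_ordered_list_py_alt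
  simp only [PySem.List.foldl_append_eq_flatMap]
  rw [setfold_eq_update]
  rw [show (PySem.Set.empty : PySem.Set Int) = ([] : List Int) from rfl,
      PySem.Set.update_nil_left]
  exact (dedup_sorted_eq_sorted_ofList _).symm
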